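-- pv_equiv track=rewrite | github.com/pruthviraj-chavan/Python-Projects- | ibm.py | findTotalWeight
-- ===== SOURCE A (Python) =====
-- def findTotalWeight(cans):
--     total_weight = 0
--
--     while len(cans) > 0:
--         # Find the index of the minimum weight can
--         min_index = cans.index(min(cans))
--         # Add the weight of the lightest can to the total weight
--         total_weight += cans[min_index]
--
--         # Determine the range to remove (the can and its adjacent cans)
--         if min_index == 0:
--             # If it's the first can, remove the first two
--             del cans[:2]
--         elif min_index == len(cans) - 1:
--             # If it's the last can, remove the last two
--             del cans[-2:]
--         else:
--             # Otherwise, remove the can and its two adjacent cans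
--             del cans[min_index-1:min_index+2]
--
--     return total_weight
-- ===== SOURCE B (Python) =====
-- def findTotalWeight(cans):
--     # Equivalence is about the return value only: A empties `cans` in place, B leaves it untouched.
--     n = len(cans)
--     pairs = sorted((v, i) for i, v in enumerate(cans))
--     alive = [True] * n
--     prev = list(range(-1, n - 1))
--     nxt = list(range(1, n + 1))
--     total = 0
--     for v, i in pairs:
--         if not alive[i]:
--             continue
--         total += v
--         l = prev[i]
--         r = nxt[i]
--         alive[i] = False
--         if l >= 0:
--             alive[l] = False
--             l = prev[l]
--         if r < n:
--             alive[r] = False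
--             r = nxt[r]
--         if l >= 0:
--             nxt[l] = r
--         if r < n:
--             prev[r] = l
--     return total
-- ===== Notes on version B (the rewrite author's own statement) =====
-- stated objective: faster
-- what changed: Replaces the quadratic repeated min-scan-and-splice loop by sorting (value,index) pairs once and scanning them with lazy deletion over a doubly linked list (prev/next arrays), removing each lightest can and its current neighbors in O(1).
import Mathlib
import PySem

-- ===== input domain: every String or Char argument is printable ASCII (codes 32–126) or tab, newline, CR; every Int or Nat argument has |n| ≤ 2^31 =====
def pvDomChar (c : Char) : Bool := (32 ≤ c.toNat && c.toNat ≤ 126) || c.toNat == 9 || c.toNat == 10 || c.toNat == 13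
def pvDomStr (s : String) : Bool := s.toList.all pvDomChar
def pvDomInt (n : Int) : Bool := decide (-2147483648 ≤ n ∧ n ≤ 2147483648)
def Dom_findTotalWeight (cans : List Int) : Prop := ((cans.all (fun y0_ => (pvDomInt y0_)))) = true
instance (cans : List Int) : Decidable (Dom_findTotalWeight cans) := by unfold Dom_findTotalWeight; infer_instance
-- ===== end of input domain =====

-- B replaces A's quadratic repeated min-scan-and-splice by one sort of (value,index) pairs plus a
-- lazily-deleted doubly linked list (prev/next arrays); equivalence is about the RETURN value only
-- (A empties its argument list in place, B does not mutate it).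

-- ===== PORT A =====
-- while len(cans) > 0: each iteration deletes at least one element, so fuel = initial length suffices.
def findTotalWeight_go : Nat → List Int → Int → Int
  | 0, _, total => total
  | fuel+1, cans, total =>
    if cans = [] then total
    else
      let m := (PySem.List.min? cans (fun x => x)).getD 0          -- min(cans)
      let minIndex := (PySem.List.index? cans m).getD 0            -- cans.index(...)
      let total := total + PySem.List.pyGetD cans (minIndex : Int) 0   -- total_weight += cans[min_index]
      if minIndex = 0 then
        findTotalWeight_go fuel (cans.drop 2) total                -- del cans[:2]
      else if minIndex = cans.length - 1 then
        findTotalWeight_go fuel (cans.take (cans.length - 2)) total    -- del cans[-2:] (here len ≥ 2)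
      else
        -- del cans[min_index-1:min_index+2]; in this branch 1 ≤ min_index, so the slice is exact
        findTotalWeight_go fuel (cans.take (minIndex - 1) ++ cans.drop (minIndex + 2)) total

def findTotalWeight (cans : List Int) : Int := findTotalWeight_go cans.length cans 0

-- ===== PORT B =====
-- pairs = sorted((v, i) for i, v in enumerate(cans))
def altPairs (cans : List Int) : List (Int × Int) :=
  PySem.List.sorted2 ((PySem.List.enumerate cans 0).map (fun p => (p.2, p.1))) Prod.fst Prod.snd

-- the for-loop over pairs, with state (alive, prev, nxt, total)
def altLoop (n : Int) : List (Int × Int) → List Bool → List Int → List Int → Int → Int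
  | [], _, _, _, total => total
  | (v, i) :: rest, alive, prev, nxt, total =>
    if PySem.List.pyGetD alive i false = false then altLoop n rest alive prev nxt total
    else
      let total := total + v
      let l := PySem.List.pyGetD prev i 0
      let r := PySem.List.pyGetD nxt i 0
      let alive := PySem.List.pySetD alive i false
      let al : List Bool × Int := if 0 ≤ l then (PySem.List.pySetD alive l false, PySem.List.pyGetD prev l 0) else (alive, l)
      let alive := al.1
      let l := al.2
      let ar : List Bool × Int := if r < n then (PySem.List.pySetD alive r false, PySem.List.pyGetD nxt r 0) else (alive, r)
      let alive := ar.1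
      let r := ar.2
      let nxt := if 0 ≤ l then PySem.List.pySetD nxt l r else nxt
      let prev := if r < n then PySem.List.pySetD prev r l else prev
      altLoop n rest alive prev nxt total

def findTotalWeight_alt (cans : List Int) : Int :=
  let n : Int := cans.length
  altLoop n (altPairs cans)
    (PySem.List.pyRepeat [true] n)          -- [True] * n
    (PySem.List.pyRange (-1) (n - 1) 1)     -- list(range(-1, n-1))
    (PySem.List.pyRange 1 (n + 1) 1)        -- list(range(1, n+1))
    0

-- ===== PRECONDITION & SPEC =====
def Spec_findTotalWeight (cans : List Int) (out : Int) : Prop := out = findTotalWeight_alt cans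
instance (cans : List Int) (out : Int) : Decidable (Spec_findTotalWeight cans out) := by unfold Spec_findTotalWeight; infer_instance

-- ===== CLAIM (what is proved, stated in full; the proofs are below) =====
def Claim_equal_findTotalWeight : Prop := ∀ (cans : List Int), Dom_findTotalWeight cans → Spec_findTotalWeight cans (findTotalWeight cans)

-- ===== LEMMAS AND PROOFS =====

-- ---------- small getD/set helpers ----------
theorem pvGetD_set_self {α : Type} (xs : List α) (i : Nat) (v d : α) (h : i < xs.length) :
    (xs.set i v).getD i d = v := by
  rw [List.getD_eq_getElem?_getD, List.getElem?_set_self h]; rfl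

theorem pvGetD_set_ne {α : Type} (xs : List α) (i j : Nat) (v d : α) (h : i ≠ j) :
    (xs.set i v).getD j d = xs.getD j d := by
  rw [List.getD_eq_getElem?_getD, List.getElem?_set_ne h, ← List.getD_eq_getElem?_getD]

-- ---------- argmin of a nonempty list is in range ----------
theorem pv_argmin (cs : List Int) (h : cs ≠ []) :
    ∃ m k, PySem.List.min? cs (fun x => x) = some m ∧ PySem.List.index? cs m = some k ∧
      k < cs.length := by
  obtain ⟨m, hm⟩ : ∃ m, PySem.List.min? cs (fun x => x) = some m := by
    cases hmm : PySem.List.min? cs (fun x => x) with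
    | none => exact absurd ((PySem.List.min?_eq_none_iff cs _).1 hmm) h
    | some m => exact ⟨m, rfl⟩
  have hmem : m ∈ cs := PySem.List.min?_mem hm
  obtain ⟨k, hk⟩ : ∃ k, PySem.List.index? cs m = some k := by
    cases hkk : PySem.List.index? cs m with
    | none =>
      have := (PySem.List.index?_isSome_iff cs m).2 hmem
      rw [hkk] at this; simp at this
    | some k => exact ⟨k, rfl⟩
  obtain ⟨hlt, -, -⟩ := PySem.List.getElem_of_index?_eq_some hk
  exact ⟨m, k, hm, hk, hlt⟩

def pvArgmin (cs : List Int) : Nat :=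
  (PySem.List.index? cs ((PySem.List.min? cs (fun x => x)).getD 0)).getD 0

theorem pvArgmin_def (cs : List Int) : pvArgmin cs =
    (PySem.List.index? cs ((PySem.List.min? cs (fun x => x)).getD 0)).getD 0 := rfl

theorem pvArgmin_lt (cs : List Int) (h : cs ≠ []) : pvArgmin cs < cs.length := by
  unfold pvArgmin
  obtain ⟨m, k, hm, hk, hlt⟩ := pv_argmin cs h
  rw [hm]
  simp only [Option.getD_some]
  rw [hk]
  exact hlt

-- ---------- the abstract process on (index, value) pairs ----------
def goM (L : List (Nat × Int)) (total : Int) : Int :=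
  if hL : L = [] then total
  else
    if hk : pvArgmin (L.map Prod.snd) = 0 then
      goM (L.drop 2)
        (total + PySem.List.pyGetD (L.map Prod.snd) ((pvArgmin (L.map Prod.snd) : Nat) : Int) 0)
    else if hk2 : pvArgmin (L.map Prod.snd) = L.length - 1 then
      goM (L.take (L.length - 2))
        (total + PySem.List.pyGetD (L.map Prod.snd) ((pvArgmin (L.map Prod.snd) : Nat) : Int) 0)
    else
      goM (L.take (pvArgmin (L.map Prod.snd) - 1) ++ L.drop (pvArgmin (L.map Prod.snd) + 2))
        (total + PySem.List.pyGetD (L.map Prod.snd) ((pvArgmin (L.map Prod.snd) : Nat) : Int) 0)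
termination_by L.length
decreasing_by
  · have : L.length ≠ 0 := fun h => hL (List.length_eq_zero_iff.1 h)
    simp [List.length_drop]; omega
  · have : L.length ≠ 0 := fun h => hL (List.length_eq_zero_iff.1 h)
    simp [List.length_take]
    exact Nat.pos_of_ne_zero this
  · have h0 : L.length ≠ 0 := fun h => hL (List.length_eq_zero_iff.1 h)
    have hcs : (L.map Prod.snd) ≠ [] := by simpa [List.map_eq_nil_iff] using hL
    have := pvArgmin_lt (L.map Prod.snd) hcs
    simp only [List.length_map] at this
    have hmap : List.map (fun (x : {p // p ∈ L}) => (x : Nat × Int).2) L.attach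
        = List.map Prod.snd L := List.attach_map_val
    simp only [List.length_append, List.length_take, List.length_drop, hmap]
    omega

-- ---------- A's loop equals the abstract process ----------
theorem goA_eq_goM : ∀ (fuel : Nat) (L : List (Nat × Int)) (total : Int),
    L.length ≤ fuel → findTotalWeight_go fuel (L.map Prod.snd) total = goM L total := by
  intro fuel
  induction fuel with
  | zero =>
    intro L total hle
    have : L = [] := List.length_eq_zero_iff.1 (Nat.le_zero.1 hle)
    subst this
    simp [findTotalWeight_go, goM]
  | succ fuel ih =>
    intro L total hle
    by_cases hL : L = []
    · subst hL; simp [findTotalWeight_go, goM]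
    · have hcs : (L.map Prod.snd) ≠ [] := by simpa [List.map_eq_nil_iff] using hL
      have hlen0 : L.length ≠ 0 := fun h => hL (List.length_eq_zero_iff.1 h)
      have hkk := pvArgmin_lt (L.map Prod.snd) hcs
      rw [goM, findTotalWeight_go]
      simp only [if_neg hcs, dif_neg hL]
      rw [← pvArgmin_def]
      simp only [List.length_map] at hkk ⊢
      by_cases h0 : pvArgmin (L.map Prod.snd) = 0
      · simp only [if_pos h0, dif_pos h0]
        rw [← List.map_drop]
        exact ih _ _ (by simp [List.length_drop]; omega)
      · simp only [if_neg h0, dif_neg h0]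
        by_cases h1 : pvArgmin (L.map Prod.snd) = L.length - 1
        · simp only [if_pos h1, dif_pos h1]
          rw [← List.map_take]
          exact ih _ _ (by simp [List.length_take]; omega)
        · simp only [if_neg h1, dif_neg h1]
          rw [← List.map_take, ← List.map_drop, ← List.map_append]
          exact ih _ _ (by simp [List.length_append, List.length_take, List.length_drop]; omega)

-- ---------- one step of the abstract process ----------
theorem goM_step (A B : List (Nat × Int)) (j : Nat) (v total : Int)
    (hmin : ∀ q ∈ A ++ (j, v) :: B, v ≤ q.2)
    (hfirst : ∀ q ∈ A, q.2 ≠ v) :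
    goM (A ++ (j, v) :: B) total = goM (A.dropLast ++ B.tail) (total + v) := by
  have hL : A ++ (j, v) :: B ≠ [] := by simp
  have hcs : (A ++ (j, v) :: B).map Prod.snd = A.map Prod.snd ++ v :: B.map Prod.snd := by
    simp
  have hvmem : v ∈ (A ++ (j, v) :: B).map Prod.snd := by
    rw [hcs]; exact List.mem_append_right _ (List.mem_cons_self)
  -- the minimum value is v
  have hmne : (A ++ (j, v) :: B).map Prod.snd ≠ [] := by simp
  obtain ⟨m, hm⟩ : ∃ m, PySem.List.min? ((A ++ (j, v) :: B).map Prod.snd) (fun x => x) = some m := by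
    cases hmm : PySem.List.min? ((A ++ (j, v) :: B).map Prod.snd) (fun x => x) with
    | none => exact absurd ((PySem.List.min?_eq_none_iff _ _).1 hmm) hmne
    | some m => exact ⟨m, rfl⟩
  have hmv : m = v := by
    have h1 : m ≤ v := PySem.List.min?_isMin hm v hvmem
    have h2 : v ≤ m := by
      have hmem : m ∈ (A ++ (j, v) :: B).map Prod.snd := PySem.List.min?_mem hm
      obtain ⟨q, hq, hq2⟩ := List.mem_map.1 hmem
      rw [← hq2]; exact hmin q hq
    omega
  have hvnotpre : v ∉ A.map Prod.snd := by
    intro hv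
    obtain ⟨q, hq, hq2⟩ := List.mem_map.1 hv
    exact hfirst q hq hq2
  have hidx : PySem.List.index? ((A ++ (j, v) :: B).map Prod.snd) v = some (A.length) := by
    rw [PySem.List.index?_eq_some_iff]
    exact ⟨A.map Prod.snd, B.map Prod.snd, hcs, by simp, hvnotpre⟩
  have harg : pvArgmin ((A ++ (j, v) :: B).map Prod.snd) = A.length := by
    rw [pvArgmin_def, hm]
    simp only [Option.getD_some]
    rw [hmv, hidx]
    rfl
  have hval : PySem.List.pyGetD ((A ++ (j, v) :: B).map Prod.snd) ((A.length : Nat) : Int) 0 = v := by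
    rw [PySem.List.pyGetD_natCast, hcs]
    rw [List.getD_eq_getElem _ _ (by simp)]
    rw [List.getElem_append_right (by simp)]
    simp
  rw [goM]
  rw [dif_neg hL]
  simp only [harg, hval]
  rcases A.eq_nil_or_concat with hA | ⟨A₀, la, hA⟩
  · subst hA
    simp only [List.length_nil, List.nil_append, List.dropLast_nil,
      List.drop_succ_cons, List.drop_one]
    simp
  · have hAlen : A.length ≠ 0 := by subst hA; simp
    rw [dif_neg hAlen]
    by_cases hB : B = []
    · subst hB
      have hcond : A.length = (A ++ [(j, v)]).length - 1 := by simp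
      rw [dif_pos hcond]
      have htake : (A ++ [(j, v)]).take ((A ++ [(j, v)]).length - 2) = A.dropLast := by
        rw [List.dropLast_eq_take, List.take_append_of_le_length (by simp)]
        congr 1
        simp
      rw [htake]
      simp
    · have hcond : ¬ (A.length = (A ++ (j, v) :: B).length - 1) := by
        have : B.length ≠ 0 := fun h => hB (List.length_eq_zero_iff.1 h)
        simp only [List.length_append, List.length_cons]
        omega
      rw [dif_neg hcond]
      have htake : (A ++ (j, v) :: B).take (A.length - 1) = A.dropLast := by
        rw [List.dropLast_eq_take, List.take_append_of_le_length (by omega)]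
      have hdrop : (A ++ (j, v) :: B).drop (A.length + 2) = B.tail := by
        rw [List.drop_append]
        have h1 : A.length + 2 - A.length = 2 := by omega
        rw [List.drop_eq_nil_of_le (by omega), h1]
        cases B with
        | nil => simp at hB
        | cons b B' => simp [List.drop_succ_cons, List.drop_one]
      rw [htake, hdrop]

-- ---------- doubly-linked-list chain predicate ----------
def pvHeadD (is : List Nat) (d : Int) : Int := ((is.head?).map (fun b => (b : Int))).getD d
def pvLastD (is : List Nat) (d : Int) : Int := ((is.getLast?).map (fun b => (b : Int))).getD d

theorem pvHeadD_nil (d : Int) : pvHeadD [] d = d := rfl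
theorem pvHeadD_cons (z : Nat) (is : List Nat) (d : Int) : pvHeadD (z :: is) d = (z : Int) := rfl
theorem pvLastD_nil (d : Int) : pvLastD [] d = d := rfl
theorem pvLastD_concat (is : List Nat) (z : Nat) (d : Int) : pvLastD (is ++ [z]) d = (z : Int) := by
  simp [pvLastD]

def ChainP (prev nxt : List Int) (pl : Int) (is : List Nat) (pr : Int) : Prop :=
  match is with
  | [] => True
  | a :: rest =>
      prev.getD a 0 = pl ∧ nxt.getD a 0 = pvHeadD rest pr ∧ ChainP prev nxt (a : Int) rest pr

theorem chainP_congr {prev nxt prev' nxt' : List Int} :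
    ∀ {is : List Nat} {pl pr : Int},
    (∀ a ∈ is, prev'.getD a 0 = prev.getD a 0 ∧ nxt'.getD a 0 = nxt.getD a 0) →
    ChainP prev nxt pl is pr → ChainP prev' nxt' pl is pr := by
  intro is
  induction is with
  | nil => intro pl pr _ _; trivial
  | cons a rest ih =>
    intro pl pr hcong h
    obtain ⟨h1, h2, h3⟩ := h
    exact ⟨(hcong a (by simp)).1.trans h1, (hcong a (by simp)).2.trans h2,
      ih (fun b hb => hcong b (by simp [hb])) h3⟩

theorem chainP_append {prev nxt : List Int} :
    ∀ {is1 is2 : List Nat} {pl pr : Int},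
    ChainP prev nxt pl (is1 ++ is2) pr ↔
      ChainP prev nxt pl is1 (pvHeadD is2 pr) ∧ ChainP prev nxt (pvLastD is1 pl) is2 pr := by
  intro is1
  induction is1 with
  | nil => intro is2 pl pr; simp [ChainP, pvLastD]
  | cons a rest ih =>
    intro is2 pl pr
    simp only [List.cons_append, ChainP]
    constructor
    · rintro ⟨h1, h2, h3⟩
      rw [ih] at h3
      refine ⟨⟨h1, ?_, h3.1⟩, ?_⟩
      · cases rest with
        | nil => simp [pvHeadD] at h2 ⊢; cases is2 <;> simpa [pvHeadD] using h2
        | cons b r => simpa [pvHeadD] using h2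
      · cases rest with
        | nil => simpa [pvLastD] using h3.2
        | cons b r => simpa [pvLastD, List.getLast?_cons_cons] using h3.2
    · rintro ⟨⟨h1, h2, h3⟩, h4⟩
      refine ⟨h1, ?_, ?_⟩
      · cases rest with
        | nil => simp [pvHeadD] at h2 ⊢; cases is2 <;> simpa [pvHeadD] using h2
        | cons b r => simpa [pvHeadD] using h2
      · rw [ih]
        refine ⟨h3, ?_⟩
        cases rest with
        | nil => simpa [pvLastD] using h4
        | cons b r => simpa [pvLastD, List.getLast?_cons_cons] using h4

theorem chain_snoc_retarget {prev nxt prev' nxt' : List Int} :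
    ∀ {is : List Nat} {pl pr pr' : Int},
    (∀ a ∈ is.dropLast, prev'.getD a 0 = prev.getD a 0 ∧ nxt'.getD a 0 = nxt.getD a 0) →
    (∀ z, is.getLast? = some z → prev'.getD z 0 = prev.getD z 0 ∧ nxt'.getD z 0 = pr') →
    ChainP prev nxt pl is pr → ChainP prev' nxt' pl is pr' := by
  intro is
  induction is with
  | nil => intro pl pr pr' _ _ _; trivial
  | cons a rest ih =>
    intro pl pr pr' hcong hlast h
    obtain ⟨h1, h2, h3⟩ := h
    cases rest with
    | nil =>
      obtain ⟨hz1, hz2⟩ := hlast a (by simp)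
      exact ⟨hz1.trans h1, hz2, trivial⟩
    | cons b r =>
      have ha : a ∈ (a :: b :: r).dropLast := by simp [List.dropLast_cons₂]
      refine ⟨(hcong a ha).1.trans h1, (hcong a ha).2.trans (by simpa [pvHeadD] using h2), ?_⟩
      exact ih (fun x hx => hcong x (by simp [List.dropLast_cons₂] at hx ⊢; tauto))
        (fun z hz => hlast z (by simpa [List.getLast?_cons_cons] using hz)) h3

theorem chain_head_retarget {prev nxt prev' nxt' : List Int} {is : List Nat} {pl pl' pr : Int}
    (hcong : ∀ a ∈ is.tail, prev'.getD a 0 = prev.getD a 0 ∧ nxt'.getD a 0 = nxt.getD a 0)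
    (hhead : ∀ z, is.head? = some z → prev'.getD z 0 = pl' ∧ nxt'.getD z 0 = nxt.getD z 0)
    (h : ChainP prev nxt pl is pr) : ChainP prev' nxt' pl' is pr := by
  cases is with
  | nil => trivial
  | cons a rest =>
    obtain ⟨h1, h2, h3⟩ := h
    obtain ⟨hz1, hz2⟩ := hhead a rfl
    exact ⟨hz1, hz2.trans h2, chainP_congr (fun b hb => hcong b (by simpa using hb)) h3⟩

-- ---------- the loop invariant of B ----------
structure BInv (n : Nat) (cans : List Int) (ps : List (Int × Int)) (L : List (Nat × Int))
    (alive : List Bool) (prev nxt : List Int) : Prop where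
  ha : alive.length = n
  hp : prev.length = n
  hx : nxt.length = n
  hLn : ∀ p ∈ L, p.1 < n
  hLv : ∀ p ∈ L, cans.getD p.1 0 = p.2
  hmono : L.Pairwise (fun p q => p.1 < q.1)
  halive : ∀ i < n, (alive.getD i false = true ↔ i ∈ L.map Prod.fst)
  hchain : ChainP prev nxt (-1) (L.map Prod.fst) (n : Int)
  hsorted : ps.Pairwise (fun a b => a.1 < b.1 ∨ (a.1 = b.1 ∧ a.2 < b.2))
  hcomp : ∀ p ∈ L, ((p.2, (p.1 : Int)) ∈ ps)
  hps : ∀ q ∈ ps, ∃ j : Nat, j < n ∧ q.2 = (j : Int) ∧ cans.getD j 0 = q.1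

theorem pvLastD_some {is : List Nat} {z : Nat} (h : is.getLast? = some z) (d : Int) :
    pvLastD is d = (z : Int) := by simp [pvLastD, h]

theorem pv_lt_getLast : ∀ (is : List Nat), is.Pairwise (· < ·) → ∀ z, is.getLast? = some z →
    ∀ a ∈ is.dropLast, a < z := by
  intro is
  induction is with
  | nil => simp
  | cons a rest ih =>
    intro h z hz x hx
    cases rest with
    | nil => simp at hx
    | cons b r =>
      rw [List.dropLast_cons₂] at hx
      rw [List.getLast?_cons_cons] at hz
      rcases List.mem_cons.1 hx with hx1 | hx2
      · subst hx1
        exact (List.pairwise_cons.1 h).1 z (List.mem_of_getLast? hz)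
      · exact ih (List.pairwise_cons.1 h).2 z hz x hx2

-- ---------- B's loop equals the abstract process ----------
theorem altLoop_eq_goM (n : Nat) (cans : List Int) :
    ∀ (ps : List (Int × Int)) (L : List (Nat × Int)) (alive : List Bool) (prev nxt : List Int)
      (total : Int), BInv n cans ps L alive prev nxt →
      altLoop (n : Int) ps alive prev nxt total = goM L total := by
  intro ps
  induction ps with
  | nil =>
    intro L alive prev nxt total inv
    cases L with
    | nil => simp [altLoop, goM]
    | cons p L' => exact absurd (inv.hcomp p (List.mem_cons_self)) (by simp)
  | cons q rest ih =>
    intro L alive prev nxt total inv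
    obtain ⟨v, ii⟩ := q
    obtain ⟨j, hjn, hii, hjv⟩ := inv.hps (v, ii) (List.mem_cons_self)
    simp only at hii hjv
    subst hii
    simp only [altLoop, PySem.List.pyGetD_natCast]
    by_cases hdead : alive.getD j false = false
    · rw [if_pos hdead]
      refine ih L alive prev nxt total ⟨inv.ha, inv.hp, inv.hx, inv.hLn, inv.hLv, inv.hmono,
        inv.halive, inv.hchain, (List.pairwise_cons.1 inv.hsorted).2, ?_, ?_⟩
      · intro p hp
        rcases List.mem_cons.1 (inv.hcomp p hp) with heq | hmem
        · exfalso
          have hpj : p.1 = j := by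
            have := congrArg Prod.snd heq
            simpa using this
          have : alive.getD j false = true := by
            rw [(inv.halive j hjn)]
            exact List.mem_map.2 ⟨p, hp, hpj⟩
          rw [this] at hdead; simp at hdead
        · exact hmem
      · intro p hp; exact inv.hps p (List.mem_cons_of_mem _ hp)
    · have halivej : alive.getD j false = true := by
        cases h : alive.getD j false
        · exact absurd h hdead
        · rfl
      rw [if_neg hdead]
      -- j is alive, so (j, v) ∈ L; decompose L around it
      have hjmem : j ∈ L.map Prod.fst := (inv.halive j hjn).1 halivej
      obtain ⟨p, hpL, hpj⟩ := List.mem_map.1 hjmem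
      have hpv : p = (j, v) := by
        have := inv.hLv p hpL
        rw [hpj, hjv] at this
        exact Prod.ext hpj this.symm
      rw [hpv] at hpL
      obtain ⟨A, B, hL⟩ := List.append_of_mem hpL
      subst hL
      -- order facts
      obtain ⟨hpwA, hpwJB, hcross⟩ := List.pairwise_append.1 inv.hmono
      obtain ⟨hjB, hpwB⟩ := List.pairwise_cons.1 hpwJB
      have hAj : ∀ p ∈ A, p.1 < j := fun p hp => hcross p hp (j, v) (List.mem_cons_self)
      have hsortedhd := (List.pairwise_cons.1 inv.hsorted).1
      -- conditions of goM_step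
      have hmin : ∀ q ∈ A ++ (j, v) :: B, v ≤ q.2 := by
        intro q hq
        rcases List.mem_cons.1 (inv.hcomp q hq) with heq | hmem
        · have := congrArg Prod.fst heq; simp at this; omega
        · rcases hsortedhd _ hmem with h | ⟨h, -⟩ <;> simp at h <;> omega
      have hfirst : ∀ q ∈ A, q.2 ≠ v := by
        intro q hq hqv
        have hqj : q.1 < j := hAj q hq
        rcases List.mem_cons.1 (inv.hcomp q (List.mem_append_left _ hq)) with heq | hmem
        · have := congrArg Prod.snd heq
          simp at this
          omega
        · rcases hsortedhd _ hmem with h | ⟨-, h⟩ <;> simp [hqv] at h <;> omega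
      rw [goM_step A B j v total hmin hfirst]
      -- chain facts around j
      have hchain := inv.hchain
      rw [show (A ++ (j, v) :: B).map Prod.fst
          = A.map Prod.fst ++ j :: B.map Prod.fst by simp] at hchain
      obtain ⟨C1, C2⟩ := chainP_append.1 hchain
      rw [show pvHeadD (j :: B.map Prod.fst) (n : Int) = (j : Int) by simp [pvHeadD]] at C1
      obtain ⟨hprevj, hnxtj, C3⟩ := C2
      -- the members of L are < n, and index lists are pairwise <
      have hALn : ∀ p ∈ A, p.1 < n := fun p hp => inv.hLn p (List.mem_append_left _ hp)
      have hBLn : ∀ p ∈ B, p.1 < n :=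
        fun p hp => inv.hLn p (List.mem_append_right _ (List.mem_cons_of_mem _ hp))
      -- invariant pieces that do not depend on the case analysis
      have hsub : (A.dropLast ++ B.tail).Sublist (A ++ (j, v) :: B) :=
        (A.dropLast_sublist).append ((List.tail_sublist B).trans (List.sublist_cons_self _ _))
      have hLn' : ∀ p ∈ A.dropLast ++ B.tail, p.1 < n := fun p hp => inv.hLn p (hsub.mem hp)
      have hLv' : ∀ p ∈ A.dropLast ++ B.tail, cans.getD p.1 0 = p.2 :=
        fun p hp => inv.hLv p (hsub.mem hp)
      have hmono' : (A.dropLast ++ B.tail).Pairwise (fun p q => p.1 < q.1) :=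
        inv.hmono.sublist hsub
      have hsorted' := (List.pairwise_cons.1 inv.hsorted).2
      have hcomp' : ∀ p ∈ A.dropLast ++ B.tail, ((p.2, (p.1 : Int)) ∈ rest) := by
        intro p hp
        rcases List.mem_cons.1 (inv.hcomp p (hsub.mem hp)) with heq | hmem
        · exfalso
          have hp1 : p.1 = j := by have := congrArg Prod.snd heq; simpa using this
          rcases List.mem_append.1 hp with hpA | hpB
          · have := hAj p (A.dropLast_sublist.mem hpA); omega
          · have := hjB p ((List.tail_sublist B).mem hpB); omega
        · exact hmem
      have hps' : ∀ q ∈ rest, ∃ j : Nat, j < n ∧ q.2 = (j : Int) ∧ cans.getD j 0 = q.1 :=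
        fun q hq => inv.hps q (List.mem_cons_of_mem _ hq)
      -- now the case analysis on the shape of the neighbourhood of j
      have hjlen : j < alive.length := by rw [inv.ha]; exact hjn
      rcases A.eq_nil_or_concat with hA | ⟨A₀, la, hA⟩
      · -- no left neighbour
        subst hA
        have hprevj' : prev.getD j 0 = -1 := by simpa [pvLastD_nil] using hprevj
        cases B with
        | nil =>
          -- A = [], B = []: only (j, v) is left
          have hnxtj' : nxt.getD j 0 = (n : Int) := by simpa [pvHeadD_nil] using hnxtj
          have hc1 : ¬ (0 ≤ (-1 : Int)) := by omega
          have hcn : ¬ ((n : Int) < (n : Int)) := by omega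
          simp only [hprevj', hnxtj', PySem.List.pySetD_natCast, if_neg hc1, if_neg hcn]
          simp only [List.dropLast_nil, List.tail_nil, List.nil_append]
          apply ih
          refine ⟨by simp [inv.ha], inv.hp, inv.hx, by simp, by simp, by simp, ?_, trivial,
            hsorted', by simp, hps'⟩
          intro i hi
          simp only [List.map_nil, List.not_mem_nil, iff_false]
          by_cases hij : i = j
          · rw [hij, pvGetD_set_self alive j false false hjlen]
            simp
          · rw [pvGetD_set_ne alive j i false false (fun h => hij h.symm)]
            have := (inv.halive i hi)
            simp only [List.nil_append, List.map_cons, List.map_nil] at this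
            simp only [this]
            simp [hij]
        | cons hb B' =>
          -- A = [], B = hb :: B': remove j and hb, new head of the list is B'
          have hhbn : hb.1 < n := hBLn hb (List.mem_cons_self)
          have hhblen : hb.1 < alive.length := by rw [inv.ha]; exact hhbn
          have hnxtj' : nxt.getD j 0 = (hb.1 : Int) := by
            rw [show (hb :: B').map Prod.fst = hb.1 :: B'.map Prod.fst by simp,
              pvHeadD_cons] at hnxtj
            exact hnxtj
          obtain ⟨hprevhb, hnxthb, C3b⟩ := C3
          have hjhb : j < hb.1 := hjB hb (List.mem_cons_self)
          have hjB' : ∀ p ∈ B', j < p.1 := fun p hp => hjB p (List.mem_cons_of_mem _ hp)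
          have hhbB' : ∀ p ∈ B', hb.1 < p.1 := (List.pairwise_cons.1 hpwB).1
          have hc1 : ¬ (0 ≤ (-1 : Int)) := by omega
          have hc2 : ((hb.1 : Int) < (n : Int)) := by exact_mod_cast hhbn
          simp only [hprevj', hnxtj', PySem.List.pySetD_natCast, PySem.List.pyGetD_natCast,
            if_neg hc1, if_pos hc2, hnxthb]
          simp only [List.dropLast_nil, List.tail_cons, List.nil_append]
          apply ih
          have hremoved : ∀ i, i ∈ (B'.map Prod.fst) → i ≠ j ∧ i ≠ hb.1 := by
            intro i hiB
            obtain ⟨p, hp, hpi⟩ := List.mem_map.1 hiB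
            have h1 := hjB' p hp
            have h2 := hhbB' p hp
            omega
          refine ⟨by simp [inv.ha], ?_, inv.hx, by simpa using hLn', by simpa using hLv',
            by simpa using hmono', ?_, ?_, hsorted', by simpa using hcomp', hps'⟩
          · split
            · rw [PySem.List.length_pySetD]; exact inv.hp
            · exact inv.hp
          · -- aliveness after the two removals
            intro i hi
            by_cases hij : i = j
            · rw [pvGetD_set_ne _ hb.1 i false false (by omega), hij,
                pvGetD_set_self alive j false false hjlen]
              simp only [Bool.false_eq_true, false_iff]
              intro hmem
              exact (hremoved j hmem).1 rfl
            · by_cases hihb : i = hb.1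
              · rw [hihb, pvGetD_set_self _ hb.1 false false
                  (by rw [List.length_set, inv.ha]; exact hhbn)]
                simp only [Bool.false_eq_true, false_iff]
                intro hmem
                exact (hremoved hb.1 hmem).2 rfl
              · rw [pvGetD_set_ne _ hb.1 i false false (fun h => hihb h.symm),
                  pvGetD_set_ne alive j i false false (fun h => hij h.symm)]
                have := inv.halive i hi
                simp only [List.nil_append, List.map_cons] at this
                rw [this]
                simp only [List.mem_cons]
                constructor
                · rintro (h | h | h)
                  · exact absurd h hij
                  · exact absurd h hihb
                  · exact h
                · intro h; exact Or.inr (Or.inr h)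
          · -- the chain after removing the two leading cells
            cases hB'f : B'.map Prod.fst with
            | nil => trivial
            | cons z W =>
              rw [hB'f] at C3b
              rw [pvHeadD_cons]
              obtain ⟨hprevz, hnxtz, C3c⟩ := C3b
              have hzn : z < n := by
                have hzmem : z ∈ B'.map Prod.fst := by rw [hB'f]; exact List.mem_cons_self
                obtain ⟨p, hp, hpz⟩ := List.mem_map.1 hzmem
                rw [← hpz]; exact hBLn p (List.mem_cons_of_mem _ hp)
              have hzlen : z < prev.length := by rw [inv.hp]; exact hzn
              rw [if_pos (by exact_mod_cast hzn : ((z : Nat) : Int) < (n : Int))]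
              rw [PySem.List.pySetD_natCast]
              refine ⟨pvGetD_set_self prev z (-1) 0 hzlen, hnxtz, ?_⟩
              have hWz : ∀ a ∈ W, z < a := by
                have hpw' : (B'.map Prod.fst).Pairwise (· < ·) :=
                  List.pairwise_map.2 ((List.pairwise_cons.1 hpwB).2)
                rw [hB'f] at hpw'
                exact (List.pairwise_cons.1 hpw').1
              refine chainP_congr (fun a ha => ⟨?_, rfl⟩) C3c
              have := hWz a ha
              exact pvGetD_set_ne prev z a (-1) 0 (by omega)
      · -- there is a left neighbour: A = A₀ ++ [la]
        rw [List.concat_eq_append] at hA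
        subst hA
        have hlamem : la ∈ A₀ ++ [la] := List.mem_append_right _ List.mem_cons_self
        have hlan : la.1 < n := hALn la hlamem
        have hlaj : la.1 < j := hAj la hlamem
        have hmapA : (A₀ ++ [la]).map Prod.fst = A₀.map Prod.fst ++ [la.1] := by simp
        have hprevj' : prev.getD j 0 = (la.1 : Int) := by
          rw [hmapA, pvLastD_concat] at hprevj; exact hprevj
        rw [hmapA] at C1
        obtain ⟨C1a, C1b⟩ := chainP_append.1 C1
        rw [show pvHeadD [la.1] (j : Int) = (la.1 : Int) from rfl] at C1a
        obtain ⟨e3, -, -⟩ := C1b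
        have hA0la : ∀ p ∈ A₀, p.1 < la.1 := by
          obtain ⟨-, -, hcrossA⟩ := List.pairwise_append.1 hpwA
          exact fun p hp => hcrossA p hp la List.mem_cons_self
        have hA0j : ∀ p ∈ A₀, p.1 < j := fun p hp => hAj p (List.mem_append_left _ hp)
        have hA0pw : (A₀.map Prod.fst).Pairwise (· < ·) :=
          List.pairwise_map.2 (List.pairwise_append.1 hpwA).1
        have hA0n : ∀ a ∈ A₀.map Prod.fst, a < n := by
          intro a ha
          obtain ⟨p, hp, hpa⟩ := List.mem_map.1 ha
          rw [← hpa]; exact hALn p (List.mem_append_left _ hp)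
        have hA0laf : ∀ a ∈ A₀.map Prod.fst, a < la.1 := by
          intro a ha
          obtain ⟨p, hp, hpa⟩ := List.mem_map.1 ha
          rw [← hpa]; exact hA0la p hp
        have hcla : (0 : Int) ≤ (la.1 : Int) := by omega
        cases B with
        | nil =>
          have hnxtj' : nxt.getD j 0 = (n : Int) := by simpa [pvHeadD_nil] using hnxtj
          have hcn : ¬ ((n : Int) < (n : Int)) := by omega
          simp only [hprevj', hnxtj', PySem.List.pySetD_natCast, PySem.List.pyGetD_natCast,
            if_pos hcla, if_neg hcn, e3]
          rw [List.dropLast_concat]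
          simp only [List.tail_nil, List.append_nil]
          apply ih
          refine ⟨by simp [inv.ha], inv.hp, ?_, ?_, ?_, ?_, ?_, ?_, hsorted', ?_, hps'⟩
          · split
            · rw [PySem.List.length_pySetD]; exact inv.hx
            · exact inv.hx
          · intro p hp
            exact hLn' p (by simpa [List.dropLast_concat] using hp)
          · intro p hp
            exact hLv' p (by simpa [List.dropLast_concat] using hp)
          · have := hmono'
            rw [List.dropLast_concat] at this
            simpa using this
          · -- aliveness
            intro i hi
            by_cases hila : i = la.1
            · rw [hila, pvGetD_set_self _ la.1 false false
                (by rw [List.length_set, inv.ha]; exact hlan)]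
              simp only [Bool.false_eq_true, false_iff]
              intro hmem
              obtain ⟨p, hp, hpi⟩ := List.mem_map.1 hmem
              have := hA0la p hp; omega
            · by_cases hij : i = j
              · rw [pvGetD_set_ne _ la.1 i false false (fun h => hila h.symm), hij,
                  pvGetD_set_self alive j false false hjlen]
                simp only [Bool.false_eq_true, false_iff]
                intro hmem
                obtain ⟨p, hp, hpi⟩ := List.mem_map.1 hmem
                have := hA0j p hp; omega
              · rw [pvGetD_set_ne _ la.1 i false false (fun h => hila h.symm),
                  pvGetD_set_ne alive j i false false (fun h => hij h.symm)]
                rw [inv.halive i hi]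
                simp only [List.map_append, List.map_cons, List.map_nil, List.mem_append,
                  List.mem_cons, List.not_mem_nil, or_false]
                constructor
                · rintro ((h | h) | h)
                  · exact h
                  · exact absurd h hila
                  · exact absurd h hij
                · intro h; exact Or.inl (Or.inl h)
          · -- the chain: drop the last two cells, retarget the new last to n
            refine chain_snoc_retarget ?_ ?_ C1a
            · intro a ha
              refine ⟨rfl, ?_⟩
              rcases (A₀.map Prod.fst).eq_nil_or_concat with h0 | ⟨Z, z, h0⟩
              · rw [h0] at ha; simp at ha
              · rw [h0, List.concat_eq_append, pvLastD_concat]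
                rw [if_pos (by omega : (0 : Int) ≤ (z : Int)), PySem.List.pySetD_natCast]
                have haz : a < z := by
                  have := pv_lt_getLast _ hA0pw z
                    (by rw [h0, List.concat_eq_append]; exact List.getLast?_concat) a ha
                  exact this
                exact pvGetD_set_ne nxt z a (n : Int) 0 (by omega)
            · intro z hz
              refine ⟨rfl, ?_⟩
              rw [pvLastD_some hz, if_pos (by omega : (0 : Int) ≤ (z : Int)),
                PySem.List.pySetD_natCast]
              exact pvGetD_set_self nxt z (n : Int) 0
                (by rw [inv.hx]; exact hA0n z (List.mem_of_getLast? hz))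
          · intro p hp
            exact hcomp' p (by simpa [List.dropLast_concat] using hp)
        | cons hb B' =>
          have hhbn : hb.1 < n := hBLn hb (List.mem_cons_self)
          have hnxtj' : nxt.getD j 0 = (hb.1 : Int) := by
            rw [show (hb :: B').map Prod.fst = hb.1 :: B'.map Prod.fst by simp,
              pvHeadD_cons] at hnxtj
            exact hnxtj
          obtain ⟨hprevhb, hnxthb, C3b⟩ := C3
          have hjhb : j < hb.1 := hjB hb (List.mem_cons_self)
          have hjB' : ∀ p ∈ B', j < p.1 := fun p hp => hjB p (List.mem_cons_of_mem _ hp)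
          have hhbB' : ∀ p ∈ B', hb.1 < p.1 := (List.pairwise_cons.1 hpwB).1
          have hB'fn : ∀ a ∈ B'.map Prod.fst, a < n := by
            intro a ha
            obtain ⟨p, hp, hpa⟩ := List.mem_map.1 ha
            rw [← hpa]; exact hBLn p (List.mem_cons_of_mem _ hp)
          have hB'fgt : ∀ a ∈ B'.map Prod.fst, hb.1 < a := by
            intro a ha
            obtain ⟨p, hp, hpa⟩ := List.mem_map.1 ha
            rw [← hpa]; exact hhbB' p hp
          have hB'pw : (B'.map Prod.fst).Pairwise (· < ·) :=
            List.pairwise_map.2 ((List.pairwise_cons.1 hpwB).2)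
          have hc2 : ((hb.1 : Int) < (n : Int)) := by exact_mod_cast hhbn
          simp only [hprevj', hnxtj', PySem.List.pySetD_natCast, PySem.List.pyGetD_natCast,
            if_pos hcla, if_pos hc2, e3, hnxthb]
          rw [List.dropLast_concat]
          simp only [List.tail_cons]
          apply ih
          refine ⟨by simp [inv.ha], ?_, ?_, ?_, ?_, ?_, ?_, ?_, hsorted', ?_, hps'⟩
          · split
            · rw [PySem.List.length_pySetD]; exact inv.hp
            · exact inv.hp
          · split
            · rw [PySem.List.length_pySetD]; exact inv.hx
            · exact inv.hx
          · intro p hp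
            exact hLn' p (by simpa [List.dropLast_concat] using hp)
          · intro p hp
            exact hLv' p (by simpa [List.dropLast_concat] using hp)
          · have := hmono'
            rw [List.dropLast_concat, List.tail_cons] at this
            exact this
          · -- aliveness after removing j, la.1 and hb.1
            intro i hi
            have hmemno : ∀ k : Nat, k ∈ (A₀ ++ B').map Prod.fst →
                k ≠ la.1 ∧ k ≠ j ∧ k ≠ hb.1 := by
              intro k hk
              rw [List.map_append, List.mem_append] at hk
              rcases hk with hk | hk
              · have := hA0laf k hk; omega
              · have := hB'fgt k hk; omega
            by_cases hihb : i = hb.1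
            · rw [hihb, pvGetD_set_self _ hb.1 false false
                (by rw [List.length_set, List.length_set, inv.ha]; exact hhbn)]
              simp only [Bool.false_eq_true, false_iff]
              intro hmem
              exact (hmemno hb.1 hmem).2.2 rfl
            · by_cases hila : i = la.1
              · rw [pvGetD_set_ne _ hb.1 i false false (fun h => hihb h.symm), hila,
                  pvGetD_set_self _ la.1 false false
                    (by rw [List.length_set, inv.ha]; exact hlan)]
                simp only [Bool.false_eq_true, false_iff]
                intro hmem
                exact (hmemno la.1 hmem).1 rfl
              · by_cases hij : i = j
                · rw [pvGetD_set_ne _ hb.1 i false false (fun h => hihb h.symm),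
                    pvGetD_set_ne _ la.1 i false false (fun h => hila h.symm), hij,
                    pvGetD_set_self alive j false false hjlen]
                  simp only [Bool.false_eq_true, false_iff]
                  intro hmem
                  exact (hmemno j hmem).2.1 rfl
                · rw [pvGetD_set_ne _ hb.1 i false false (fun h => hihb h.symm),
                    pvGetD_set_ne _ la.1 i false false (fun h => hila h.symm),
                    pvGetD_set_ne alive j i false false (fun h => hij h.symm)]
                  rw [inv.halive i hi]
                  simp only [List.map_append, List.map_cons, List.map_nil, List.mem_append,
                    List.mem_cons, List.not_mem_nil, or_false]
                  constructor
                  · rintro ((h | h) | h | h | h)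
                    · exact Or.inl h
                    · exact absurd h hila
                    · exact absurd h hij
                    · exact absurd h hihb
                    · exact Or.inr h
                  · rintro (h | h)
                    · exact Or.inl (Or.inl h)
                    · exact Or.inr (Or.inr (Or.inr h))
          · -- the chain: splice the two sides together
            rw [List.map_append]
            cases hB'f : B'.map Prod.fst with
            | nil =>
              -- B' is empty: only the left side remains
              have hcn : ¬ ((n : Int) < (n : Int)) := by omega
              rw [pvHeadD_nil, if_neg hcn]
              rw [List.append_nil]
              refine chain_snoc_retarget ?_ ?_ C1a
              · intro a ha
                refine ⟨rfl, ?_⟩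
                rcases (A₀.map Prod.fst).eq_nil_or_concat with h0 | ⟨Z, z, h0⟩
                · rw [h0] at ha; simp at ha
                · rw [h0, List.concat_eq_append, pvLastD_concat]
                  rw [if_pos (by omega : (0 : Int) ≤ (z : Int)), PySem.List.pySetD_natCast]
                  have haz : a < z := pv_lt_getLast _ hA0pw z
                    (by rw [h0, List.concat_eq_append]; exact List.getLast?_concat) a ha
                  exact pvGetD_set_ne nxt z a _ 0 (by omega)
              · intro z hz
                refine ⟨rfl, ?_⟩
                rw [pvLastD_some hz, if_pos (by omega : (0 : Int) ≤ (z : Int)),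
                  PySem.List.pySetD_natCast]
                exact pvGetD_set_self nxt z _ 0
                  (by rw [inv.hx]; exact hA0n z (List.mem_of_getLast? hz))
            | cons w W =>
              have hwmem : w ∈ B'.map Prod.fst := by rw [hB'f]; exact List.mem_cons_self
              have hwn : w < n := hB'fn w hwmem
              have hwgt : hb.1 < w := hB'fgt w hwmem
              have hWgt : ∀ a ∈ W, w < a := by
                have := hB'pw
                rw [hB'f] at this
                exact (List.pairwise_cons.1 this).1
              have hWmem : ∀ a ∈ W, a ∈ B'.map Prod.fst := by
                intro a ha; rw [hB'f]; exact List.mem_cons_of_mem _ ha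
              rw [hB'f] at C3b
              rw [pvHeadD_cons, if_pos (by exact_mod_cast hwn : ((w : Nat) : Int) < (n : Int)),
                PySem.List.pySetD_natCast]
              refine chainP_append.mpr ⟨?_, ?_⟩
              · rw [pvHeadD_cons]
                refine chain_snoc_retarget ?_ ?_ C1a
                · intro a ha
                  have han : a ∈ A₀.map Prod.fst := List.dropLast_sublist _ |>.mem ha
                  have halt : a < la.1 := hA0laf a han
                  refine ⟨pvGetD_set_ne prev w a _ 0 (by omega), ?_⟩
                  rcases (A₀.map Prod.fst).eq_nil_or_concat with h0 | ⟨Z, z, h0⟩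
                  · rw [h0] at ha; simp at ha
                  · rw [h0, List.concat_eq_append, pvLastD_concat]
                    rw [if_pos (by omega : (0 : Int) ≤ (z : Int)), PySem.List.pySetD_natCast]
                    have haz : a < z := pv_lt_getLast _ hA0pw z
                      (by rw [h0, List.concat_eq_append]; exact List.getLast?_concat) a ha
                    exact pvGetD_set_ne nxt z a _ 0 (by omega)
                · intro z hz
                  have hzA : z ∈ A₀.map Prod.fst := List.mem_of_getLast? hz
                  have hzla : z < la.1 := hA0laf z hzA
                  refine ⟨pvGetD_set_ne prev w z _ 0 (by omega), ?_⟩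
                  rw [pvLastD_some hz, if_pos (by omega : (0 : Int) ≤ (z : Int)),
                    PySem.List.pySetD_natCast]
                  exact pvGetD_set_self nxt z _ 0 (by rw [inv.hx]; exact hA0n z hzA)
              · refine chain_head_retarget ?_ ?_ C3b
                · intro a ha
                  have haW : a ∈ W := by simpa using ha
                  have hwa : w < a := hWgt a haW
                  refine ⟨pvGetD_set_ne prev w a _ 0 (by omega), ?_⟩
                  rcases (A₀.map Prod.fst).eq_nil_or_concat with h0 | ⟨Z, z, h0⟩
                  · rw [h0, pvLastD_nil, if_neg (by omega : ¬ ((0:Int) ≤ (-1 : Int)))]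
                  · rw [h0, List.concat_eq_append, pvLastD_concat]
                    rw [if_pos (by omega : (0 : Int) ≤ (z : Int)), PySem.List.pySetD_natCast]
                    have hzla : z < la.1 := hA0laf z
                      (by rw [h0, List.concat_eq_append]; exact List.mem_append_right _ List.mem_cons_self)
                    have := hB'fgt a (hWmem a haW)
                    exact pvGetD_set_ne nxt z a _ 0 (by omega)
                · intro w' hw'
                  have hww : w' = w := by
                    have h := hw'
                    simp only [List.head?_cons, Option.some.injEq] at h
                    omega
                  subst hww
                  refine ⟨pvGetD_set_self prev w' _ 0 (by rw [inv.hp]; exact hwn), ?_⟩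
                  rcases (A₀.map Prod.fst).eq_nil_or_concat with h0 | ⟨Z, z, h0⟩
                  · rw [h0, pvLastD_nil, if_neg (by omega : ¬ ((0:Int) ≤ (-1 : Int)))]
                  · rw [h0, List.concat_eq_append, pvLastD_concat]
                    rw [if_pos (by omega : (0 : Int) ≤ (z : Int)), PySem.List.pySetD_natCast]
                    have hzla : z < la.1 := hA0laf z
                      (by rw [h0, List.concat_eq_append]; exact List.mem_append_right _ List.mem_cons_self)
                    exact pvGetD_set_ne nxt z w' _ 0 (by omega)
          · intro p hp
            exact hcomp' p (by simpa [List.dropLast_concat] using hp)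

-- ---------- insertion-sort order facts ----------
theorem pairwise_insertBy {α : Type} (before : α → α → Bool)
    (hasym : ∀ a b, before a b = true → before b a = false)
    (htrans : ∀ a b c, before a b = true → before b c = true → before a c = true)
    (x : α) : ∀ (ys : List α), ys.Pairwise (fun a b => before b a = false) →
      (PySem.List.insertBy before x ys).Pairwise (fun a b => before b a = false) := by
  intro ys
  induction ys with
  | nil => intro _; simp [PySem.List.insertBy]
  | cons y t ih =>
    intro h
    obtain ⟨hy, ht⟩ := List.pairwise_cons.1 h
    by_cases hxy : before x y = true
    · rw [PySem.List.insertBy, if_pos hxy]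
      refine List.pairwise_cons.2 ⟨?_, h⟩
      intro z hz
      rcases List.mem_cons.1 hz with hz | hz
      · subst hz; exact hasym _ _ hxy
      · -- z ∈ t; ¬ before z y; if before z x then before z y, contradiction
        by_contra hzx
        have hzx' : before z x = true := by
          cases hb : before z x
          · exact absurd hb hzx
          · rfl
        have := htrans _ _ _ hzx' hxy
        rw [hy z hz] at this; exact Bool.false_ne_true this
    · rw [PySem.List.insertBy, if_neg hxy]
      refine List.pairwise_cons.2 ⟨?_, ih ht⟩
      intro z hz
      rcases (PySem.List.mem_insertBy before x z t).1 hz with hz | hz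
      · subst hz
        cases hb : before z y
        · rfl
        · exact absurd hb (by simpa using hxy)
      · exact hy z hz

theorem pairwise_foldl_insertBy {α : Type} (before : α → α → Bool)
    (hasym : ∀ a b, before a b = true → before b a = false)
    (htrans : ∀ a b c, before a b = true → before b c = true → before a c = true) :
    ∀ (xs acc : List α), acc.Pairwise (fun a b => before b a = false) →
      (xs.foldl (fun acc x => PySem.List.insertBy before x acc) acc).Pairwise
        (fun a b => before b a = false) := by
  intro xs
  induction xs with
  | nil => intro acc h; simpa using h
  | cons x t ih =>
    intro acc h
    exact ih _ (pairwise_insertBy before hasym htrans x acc h)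

-- ---------- initial state ----------
def pvL0 (cans : List Int) : List (Nat × Int) := cans.zipIdx.map (fun p => (p.2, p.1))

theorem pvL0_map_snd (cans : List Int) : (pvL0 cans).map Prod.snd = cans := by
  simp [pvL0, List.map_map, Function.comp_def]

theorem pvL0_map_fst (cans : List Int) : (pvL0 cans).map Prod.fst = List.range cans.length := by
  simp only [pvL0, List.map_map, Function.comp_def]
  apply List.ext_getElem
  · simp
  · intro i h1 h2
    simp [List.getElem_zipIdx]

theorem pvL0_mem (cans : List Int) (p : Nat × Int) (h : p ∈ pvL0 cans) :
    ∃ (hk : p.1 < cans.length), cans[p.1] = p.2 := by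
  simp only [pvL0, List.mem_map] at h
  obtain ⟨⟨x, i⟩, hq, hqp⟩ := h
  obtain ⟨-, h2, h3⟩ := List.mem_zipIdx hq
  cases hqp
  exact ⟨by omega, by simpa using h3.symm⟩

def pvBefore (a b : Int × Int) : Bool :=
  decide (a.1 < b.1) || !decide (b.1 < a.1) && decide (a.2 < b.2)

theorem pvBefore_asym : ∀ a b, pvBefore a b = true → pvBefore b a = false := by
  intro a b h
  simp only [pvBefore, Bool.or_eq_true, Bool.and_eq_true, Bool.not_eq_true',
    decide_eq_true_eq, decide_eq_false_iff_not] at h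
  simp only [pvBefore, Bool.or_eq_false_iff, Bool.and_eq_false_iff, Bool.not_eq_false',
    decide_eq_true_eq, decide_eq_false_iff_not]
  omega

theorem pvBefore_trans : ∀ a b c, pvBefore a b = true → pvBefore b c = true →
    pvBefore a c = true := by
  intro a b c h1 h2
  simp only [pvBefore, Bool.or_eq_true, Bool.and_eq_true, Bool.not_eq_true',
    decide_eq_true_eq, decide_eq_false_iff_not] at h1 h2 ⊢
  omega

def pvXs0 (cans : List Int) : List (Int × Int) :=
  (PySem.List.enumerate cans 0).map (fun p => (p.2, p.1))

theorem altPairs_eq_foldl (cans : List Int) :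
    altPairs cans = (pvXs0 cans).foldl (fun acc x => PySem.List.insertBy pvBefore x acc) [] := rfl

theorem altPairs_perm (cans : List Int) : (altPairs cans).Perm (pvXs0 cans) :=
  PySem.List.sorted2_perm _ _ _ _

theorem pvXs0_mem (cans : List Int) (q : Int × Int) (h : q ∈ pvXs0 cans) :
    ∃ (k : Nat) (hk : k < cans.length), q = (cans[k], (k : Int)) := by
  simp only [pvXs0, List.mem_map] at h
  obtain ⟨p, hp, hpq⟩ := h
  obtain ⟨k, hk, hpk⟩ := (PySem.List.mem_enumerate_iff cans 0 p).1 hp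
  exact ⟨k, hk, by rw [← hpq, hpk]; simp⟩

theorem pvXs0_mem_of (cans : List Int) (k : Nat) (hk : k < cans.length) :
    (cans[k], (k : Int)) ∈ pvXs0 cans := by
  simp only [pvXs0, List.mem_map]
  refine ⟨((k : Int), cans[k]), ?_, rfl⟩
  rw [PySem.List.mem_enumerate_iff]
  exact ⟨k, hk, by simp⟩

theorem pvXs0_nodup (cans : List Int) : (pvXs0 cans).Nodup := by
  apply List.Nodup.map
  · intro p q h
    simp only [Prod.mk.injEq] at h
    exact Prod.ext h.2 h.1
  · apply List.Pairwise.imp (R := fun p q => p.1 < q.1)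
    · intro a b hab
      intro h; rw [h] at hab; omega
    · exact PySem.List.pairwise_lt_enumerate cans 0

theorem altPairs_sorted (cans : List Int) :
    (altPairs cans).Pairwise (fun a b => a.1 < b.1 ∨ (a.1 = b.1 ∧ a.2 < b.2)) := by
  have hR : (altPairs cans).Pairwise (fun a b => pvBefore b a = false) := by
    rw [altPairs_eq_foldl]
    exact pairwise_foldl_insertBy pvBefore pvBefore_asym pvBefore_trans _ [] (by simp)
  have hnd : (altPairs cans).Nodup := (altPairs_perm cans).nodup_iff.2 (pvXs0_nodup cans)
  refine List.Pairwise.imp ?_ (hR.and hnd)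
  intro a b hab
  obtain ⟨h1, h2⟩ := hab
  simp only [pvBefore, Bool.or_eq_false_iff, Bool.and_eq_false_iff, Bool.not_eq_false',
    decide_eq_true_eq, decide_eq_false_iff_not] at h1
  have hne : a.1 ≠ b.1 ∨ a.2 ≠ b.2 := by
    by_contra hc
    push_neg at hc
    exact h2 (Prod.ext hc.1 hc.2)
  omega

theorem chain_init (n : Nat) : ∀ (m k : Nat), k + m = n →
    ChainP (PySem.List.pyRange (-1) ((n : Int) - 1) 1) (PySem.List.pyRange 1 ((n : Int) + 1) 1)
      ((k : Int) - 1) (List.range' k m) (n : Int) := by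
  have hlp : (PySem.List.pyRange (-1) ((n : Int) - 1) 1).length = n := by
    rw [PySem.List.length_pyRange_one]; omega
  have hlx : (PySem.List.pyRange 1 ((n : Int) + 1) 1).length = n := by
    rw [PySem.List.length_pyRange_one]; omega
  intro m
  induction m with
  | zero => intro k _; trivial
  | succ m ih =>
    intro k hk
    rw [List.range'_succ]
    refine ⟨?_, ?_, ?_⟩
    · rw [List.getD_eq_getElem _ _ (by omega : k < (PySem.List.pyRange (-1) ((n : Int) - 1) 1).length)]
      rw [PySem.List.getElem_pyRange_one]
      omega
    · rw [List.getD_eq_getElem _ _ (by omega : k < (PySem.List.pyRange 1 ((n : Int) + 1) 1).length)]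
      rw [PySem.List.getElem_pyRange_one]
      cases m with
      | zero => simp [pvHeadD]; omega
      | succ m' => rw [List.range'_succ]; simp [pvHeadD]; omega
    · have := ih (k + 1) (by omega)
      have hc : ((k : Int) + 1) - 1 = (k : Int) := by omega
      rw [Nat.cast_add, Nat.cast_one, hc] at this
      exact this

theorem inv_init (cans : List Int) :
    BInv cans.length cans (altPairs cans) (pvL0 cans)
      (PySem.List.pyRepeat [true] (cans.length : Int))
      (PySem.List.pyRange (-1) ((cans.length : Int) - 1) 1)
      (PySem.List.pyRange 1 ((cans.length : Int) + 1) 1) := by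
  have hrep : PySem.List.pyRepeat [true] ((cans.length : Nat) : Int) = List.replicate cans.length true := by
    rw [PySem.List.pyRepeat_singleton]; simp
  constructor
  · rw [hrep]; simp
  · rw [PySem.List.length_pyRange_one]; omega
  · rw [PySem.List.length_pyRange_one]; omega
  · intro p hp; obtain ⟨hk, -⟩ := pvL0_mem cans p hp; exact hk
  · intro p hp
    obtain ⟨hk, hv⟩ := pvL0_mem cans p hp
    rw [List.getD_eq_getElem _ _ hk, hv]
  · rw [← List.pairwise_map (f := Prod.fst), pvL0_map_fst]
    exact List.pairwise_lt_range
  · intro i hi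
    rw [hrep, pvL0_map_fst]
    simp [List.getD_eq_getElem, hi, List.mem_range]
  · rw [pvL0_map_fst, List.range_eq_range']
    have := chain_init cans.length cans.length 0 (by omega)
    simpa using this
  · exact altPairs_sorted cans
  · intro p hp
    obtain ⟨hk, hv⟩ := pvL0_mem cans p hp
    rw [(altPairs_perm cans).mem_iff]
    have := pvXs0_mem_of cans p.1 hk
    rw [hv] at this
    exact this
  · intro q hq
    rw [(altPairs_perm cans).mem_iff] at hq
    obtain ⟨k, hk, hq⟩ := pvXs0_mem cans q hq
    exact ⟨k, hk, by rw [hq], by rw [hq]; simp [List.getD_eq_getElem, hk]⟩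

-- ===== final assembly =====
theorem findTotalWeight_eq (cans : List Int) : findTotalWeight cans = goM (pvL0 cans) 0 := by
  have h := goA_eq_goM cans.length (pvL0 cans) 0 (by simp [pvL0])
  rw [pvL0_map_snd] at h
  exact h

theorem findTotalWeight_alt_eq (cans : List Int) : findTotalWeight_alt cans = goM (pvL0 cans) 0 := by
  exact altLoop_eq_goM cans.length cans _ _ _ _ _ 0 (inv_init cans)


-- ===== VERDICT (by name: the statement is the Claim_ definition above) =====
theorem findTotalWeight_spec : Claim_equal_findTotalWeight := by
  intro cans _
  unfold Spec_findTotalWeight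
  rw [findTotalWeight_eq, findTotalWeight_alt_eq]
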